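-- pv_equiv track=rewrite | github.com/kelvinhuang0327/number-pattern-research | lottery_api/models/advanced_strategies.py | cycle_aware_filter_v11
-- ===== SOURCE A (Python) =====
-- def cycle_aware_filter_v11(history, candidates, max_num, gap_min=20, gap_max=35):
--     """調優過的週期過濾器"""
--     if not history: return candidates
--     last_seen = {i: -1 for i in range(1, max_num + 1)}
--     for i, draw in enumerate(reversed(history)):
--         for n in draw['numbers']:
--             if last_seen[n] == -1: last_seen[n] = i
--     res = []
--     for n in candidates:
--         g = last_seen.get(n, 100)
--         if g < gap_min: res.append(n)
--         elif g > gap_max: continue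
--         else: res.append(n)
--     return res
-- ===== SOURCE B (Python) =====
-- def cycle_aware_filter_v11(history, candidates, max_num, gap_min=20, gap_max=35):
--     """Window/set formulation: a candidate passes iff it was drawn within the
--     last max(gap_min, gap_max + 1) draws, or is a valid number (1..max_num)
--     that has never been drawn at all."""
--     if not history:
--         return candidates
--     window = max(gap_min, gap_max + 1)
--     start = max(0, len(history) - window)
--     recent = {n for draw in history[start:] for n in draw['numbers']}
--     ever = {n for draw in history for n in draw['numbers']}
--     return [n for n in candidates
--             if n in recent or (n not in ever and 1 <= n <= max_num)]
-- ===== Notes on version B (the rewrite author's own statement) =====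
-- stated objective: alternative
-- what changed: B replaces A's per-number last-seen table (dict pre-seeded over 1..max_num, first-write pass over reversed history, three-branch gap test) with a window/set formulation: one set of numbers drawn in the last max(gap_min, gap_max+1) draws, one set of numbers ever drawn, and a single membership comprehension; Pre_ excludes exactly the inputs where A raises KeyError (a draw without a 'numbers' key, or a drawn number outside 1..max_num).
-- intended difference: On inputs with a never-drawn candidate that A nonetheless scores with a magic pseudo-gap (100 for a candidate outside 1..max_num when a threshold reaches 100, or -1 rejected when both thresholds are negative), A's keep/drop decision comes from those sentinel constants; B keeps exactly the never-drawn candidates that are valid numbers (1..max_num), which is the intended reading of the filter. — e.g. on cycle_aware_filter_v11([[("numbers", [1])]], [2], 1, 0, 100): A returns [2], B returns []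
import Mathlib
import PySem

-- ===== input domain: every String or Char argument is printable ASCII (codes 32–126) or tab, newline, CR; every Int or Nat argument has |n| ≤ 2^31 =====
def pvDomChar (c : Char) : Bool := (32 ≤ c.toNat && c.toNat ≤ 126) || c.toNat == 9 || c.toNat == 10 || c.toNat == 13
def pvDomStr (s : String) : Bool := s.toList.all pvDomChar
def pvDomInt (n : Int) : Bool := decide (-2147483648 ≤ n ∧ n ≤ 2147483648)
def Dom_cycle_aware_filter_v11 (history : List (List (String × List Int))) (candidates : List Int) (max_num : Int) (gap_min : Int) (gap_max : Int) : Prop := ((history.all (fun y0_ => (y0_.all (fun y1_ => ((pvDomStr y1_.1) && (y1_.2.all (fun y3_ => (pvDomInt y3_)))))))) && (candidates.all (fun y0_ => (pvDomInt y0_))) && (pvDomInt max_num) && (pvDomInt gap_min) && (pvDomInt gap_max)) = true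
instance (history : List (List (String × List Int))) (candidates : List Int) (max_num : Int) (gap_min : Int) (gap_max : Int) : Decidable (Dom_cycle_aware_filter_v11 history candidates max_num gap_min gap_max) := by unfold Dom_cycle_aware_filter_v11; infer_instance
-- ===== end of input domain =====

-- B replaces A's per-number last-seen table (dict pre-seeded over 1..max_num, first-write pass
-- over reversed history, three-branch gap loop) with a window/set formulation: a set of numbers
-- drawn in the last max(gap_min, gap_max+1) draws, a set of numbers ever drawn, and one membership
-- filter. Pre_ excludes exactly the inputs where A raises KeyError; D_ states the one intended
-- difference (A scores never-drawn candidates with sentinel pseudo-gaps -1/100, B keeps exactly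
-- the valid never-drawn numbers).


-- draw['numbers'] (Pre_ guarantees the key is present, so the [] default is never observed)
def pvNums (draw : List (String × List Int)) : List Int :=
  (PySem.Dict.mk draw).getD "numbers" []

-- ===== PORT A =====
def cycle_aware_filter_v11 (history : List (List (String × List Int))) (candidates : List Int) (max_num : Int) (gap_min : Int) (gap_max : Int) : List Int :=
  if history = [] then candidates
  else
    -- last_seen = {i: -1 for i in range(1, max_num + 1)}
    let init : PySem.Dict Int Int :=
      PySem.Dict.mk ((PySem.List.pyRange 1 (max_num + 1) 1).map (fun i => (i, -1)))
    -- for i, draw in enumerate(reversed(history)): for n in draw['numbers']: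
    --   if last_seen[n] == -1: last_seen[n] = i
    -- (last_seen[n] raises KeyError for n outside 1..max_num; Pre_ excludes that, so the
    --  getD sentinel -2 is never observed)
    let last_seen : PySem.Dict Int Int :=
      (PySem.List.enumerate history.reverse 0).foldl
        (fun d p => (pvNums p.2).foldl
          (fun d n => if d.getD n (-2) == -1 then d.insert n p.1 else d) d)
        init
    candidates.foldl
      (fun res n =>
        let g := last_seen.getD n 100
        if g < gap_min then res ++ [n]
        else if g > gap_max then res
        else res ++ [n]) []

-- ===== PORT B =====
def cycle_aware_filter_v11_alt (history : List (List (String × List Int))) (candidates : List Int) (max_num : Int) (gap_min : Int) (gap_max : Int) : List Int :=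
  if history = [] then candidates
  else
    let window : Int := max gap_min (gap_max + 1)
    let start : Int := max 0 ((history.length : Int) - window)
    -- recent = {n for draw in history[start:] for n in draw['numbers']}
    let recent : PySem.Set Int :=
      (PySem.List.slice history (some start) none).foldl
        (fun s d => PySem.Set.update s (pvNums d)) PySem.Set.empty
    -- ever = {n for draw in history for n in draw['numbers']}
    let ever : PySem.Set Int :=
      history.foldl (fun s d => PySem.Set.update s (pvNums d)) PySem.Set.empty
    candidates.filter (fun n =>
      PySem.Set.contains recent n ||
      (!PySem.Set.contains ever n && (decide (1 ≤ n) && decide (n ≤ max_num))))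

-- ===== PRECONDITION & SPEC =====
-- Pre_ excludes exactly the inputs on which A raises KeyError: a draw without a "numbers"
-- key, or a drawn number outside 1..max_num (A's last_seen has only those keys).
def Pre_cycle_aware_filter_v11 (history : List (List (String × List Int))) (candidates : List Int) (max_num : Int) (gap_min : Int) (gap_max : Int) : Prop :=
  history = [] ∨ ∀ draw ∈ history,
    (PySem.Dict.mk draw).contains "numbers" = true ∧ ∀ n ∈ pvNums draw, 1 ≤ n ∧ n ≤ max_num
instance (history : List (List (String × List Int))) (candidates : List Int) (max_num : Int) (gap_min : Int) (gap_max : Int) : Decidable (Pre_cycle_aware_filter_v11 history candidates max_num gap_min gap_max) := by unfold Pre_cycle_aware_filter_v11; infer_instance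

def pvWitness_cycle_aware_filter_v11 : (List (List (String × List Int))) × List Int × Int × Int × Int :=
  ([[("numbers", [1, 2])], [("numbers", [2, 3])]], [1, 2, 3, 9], 5, 1, 1)

-- On inputs with a never-drawn candidate that A scores with a sentinel pseudo-gap (100 for a
-- candidate outside 1..max_num when a threshold reaches 100; -1 rejected when both thresholds
-- are negative), A's keep/drop decision comes from those magic constants, while B keeps exactly
-- the never-drawn candidates that are valid numbers (1..max_num) — the intended reading.
def D_cycle_aware_filter_v11 (history : List (List (String × List Int))) (candidates : List Int) (max_num : Int) (gap_min : Int) (gap_max : Int) : Prop :=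
  history ≠ [] ∧ ∃ n ∈ candidates, (∀ draw ∈ history, n ∉ pvNums draw) ∧
    (if 1 ≤ n ∧ n ≤ max_num then gap_min < 0 ∧ gap_max < -1
     else 100 < gap_min ∨ 100 ≤ gap_max)
instance (history : List (List (String × List Int))) (candidates : List Int) (max_num : Int) (gap_min : Int) (gap_max : Int) : Decidable (D_cycle_aware_filter_v11 history candidates max_num gap_min gap_max) := by unfold D_cycle_aware_filter_v11; infer_instance

def Spec_cycle_aware_filter_v11 (history : List (List (String × List Int))) (candidates : List Int) (max_num : Int) (gap_min : Int) (gap_max : Int) (out : List Int) : Prop := ¬ D_cycle_aware_filter_v11 history candidates max_num gap_min gap_max → out = cycle_aware_filter_v11_alt history candidates max_num gap_min gap_max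
instance (history : List (List (String × List Int))) (candidates : List Int) (max_num : Int) (gap_min : Int) (gap_max : Int) (out : List Int) : Decidable (Spec_cycle_aware_filter_v11 history candidates max_num gap_min gap_max out) := by unfold Spec_cycle_aware_filter_v11; infer_instance

def pvDiffWitness_cycle_aware_filter_v11 : (List (List (String × List Int))) × List Int × Int × Int × Int :=
  ([[("numbers", [1])]], [2], 1, 0, 100)
def pvDiffWitnessOut_cycle_aware_filter_v11 : (List Int) × (List Int) := ([2], [])

-- ===== CLAIM (what is proved, stated in full; the proofs are below) =====
def Claim_unchanged_cycle_aware_filter_v11 : Prop := ∀ (history : List (List (String × List Int))) (candidates : List Int) (max_num : Int) (gap_min : Int) (gap_max : Int), Dom_cycle_aware_filter_v11 history candidates max_num gap_min gap_max → Pre_cycle_aware_filter_v11 history candidates max_num gap_min gap_max → Spec_cycle_aware_filter_v11 history candidates max_num gap_min gap_max (cycle_aware_filter_v11 history candidates max_num gap_min gap_max)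
def Claim_changed_cycle_aware_filter_v11 : Prop := Dom_cycle_aware_filter_v11 (pvDiffWitness_cycle_aware_filter_v11.1) (pvDiffWitness_cycle_aware_filter_v11.2.1) (pvDiffWitness_cycle_aware_filter_v11.2.2.1) (pvDiffWitness_cycle_aware_filter_v11.2.2.2.1) (pvDiffWitness_cycle_aware_filter_v11.2.2.2.2) ∧ Pre_cycle_aware_filter_v11 (pvDiffWitness_cycle_aware_filter_v11.1) (pvDiffWitness_cycle_aware_filter_v11.2.1) (pvDiffWitness_cycle_aware_filter_v11.2.2.1) (pvDiffWitness_cycle_aware_filter_v11.2.2.2.1) (pvDiffWitness_cycle_aware_filter_v11.2.2.2.2) ∧ D_cycle_aware_filter_v11 (pvDiffWitness_cycle_aware_filter_v11.1) (pvDiffWitness_cycle_aware_filter_v11.2.1) (pvDiffWitness_cycle_aware_filter_v11.2.2.1) (pvDiffWitness_cycle_aware_filter_v11.2.2.2.1) (pvDiffWitness_cycle_aware_filter_v11.2.2.2.2) ∧ cycle_aware_filter_v11 (pvDiffWitness_cycle_aware_filter_v11.1) (pvDiffWitness_cycle_aware_filter_v11.2.1) (pvDiffWitness_cycle_aware_filter_v11.2.2.1)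 (pvDiffWitness_cycle_aware_filter_v11.2.2.2.1) (pvDiffWitness_cycle_aware_filter_v11.2.2.2.2) = pvDiffWitnessOut_cycle_aware_filter_v11.1 ∧ cycle_aware_filter_v11_alt (pvDiffWitness_cycle_aware_filter_v11.1) (pvDiffWitness_cycle_aware_filter_v11.2.1) (pvDiffWitness_cycle_aware_filter_v11.2.2.1) (pvDiffWitness_cycle_aware_filter_v11.2.2.2.1) (pvDiffWitness_cycle_aware_filter_v11.2.2.2.2) = pvDiffWitnessOut_cycle_aware_filter_v11.2 ∧ pvDiffWitnessOut_cycle_aware_filter_v11.1 ≠ pvDiffWitnessOut_cycle_aware_filter_v11.2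
def Claim_exact_cycle_aware_filter_v11 : Prop := ∀ (history : List (List (String × List Int))) (candidates : List Int) (max_num : Int) (gap_min : Int) (gap_max : Int), Dom_cycle_aware_filter_v11 history candidates max_num gap_min gap_max → Pre_cycle_aware_filter_v11 history candidates max_num gap_min gap_max → D_cycle_aware_filter_v11 history candidates max_num gap_min gap_max → cycle_aware_filter_v11 history candidates max_num gap_min gap_max ≠ cycle_aware_filter_v11_alt history candidates max_num gap_min gap_max

-- ===== LEMMAS AND PROOFS =====

-- index (counting from s) of the FIRST draw of ds containing n (A's reverse scan)
def pvFirstP (ds : List (List (String × List Int))) (s : Int) (n : Int) : Option Int :=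
  match ds with
  | [] => none
  | x :: xs => if n ∈ pvNums x then some s else pvFirstP xs (s + 1) n

-- index (counting from s) of the LAST draw of ds containing n
def pvLastP (ds : List (List (String × List Int))) (s : Int) (n : Int) : Option Int :=
  match ds with
  | [] => none
  | x :: xs =>
    match pvLastP xs (s + 1) n with
    | some j => some j
    | none => if n ∈ pvNums x then some s else none

-- A's effective gap of candidate n, phrased via the last occurrence
def pvGapA (history : List (List (String × List Int))) (max_num : Int) (n : Int) : Int :=
  match pvLastP history 0 n with
  | some j => (history.length : Int) - 1 - j
  | none => if 1 ≤ n ∧ n ≤ max_num then -1 else 100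

theorem pv_get_mk_map_const (l : List Int) (v : Int) (k : Int) :
    (PySem.Dict.mk (l.map (fun i => (i, v)))).get? k = if k ∈ l then some v else none := by
  induction l with
  | nil => simp [PySem.Dict.get?]
  | cons a t ih =>
    rw [List.map_cons, PySem.Dict.get?_mk_cons, ih]
    by_cases h : a = k
    · subst h; simp
    · have h2 : ¬ (k = a) := fun hh => h hh.symm
      simp [h, h2]

theorem pv_innerA (max_num : Int) (l : List Int) (s : Int) (hs : 0 ≤ s)
    (hr : ∀ k ∈ l, 1 ≤ k ∧ k ≤ max_num)
    (d : PySem.Dict Int Int) (g0 : Int → Int)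
    (hd : ∀ k, d.get? k = if 1 ≤ k ∧ k ≤ max_num then some (g0 k) else none) :
    ∀ k, (l.foldl (fun d n => if d.getD n (-2) == -1 then d.insert n s else d) d).get? k =
      if 1 ≤ k ∧ k ≤ max_num then some (if g0 k = -1 ∧ k ∈ l then s else g0 k) else none := by
  induction l generalizing d g0 with
  | nil => intro k; simpa using hd k
  | cons a t ih =>
    intro k
    have ha := hr a (by simp)
    have hda : d.getD a (-2) = g0 a := by
      simp [PySem.Dict.getD_eq_get?_getD, hd a, ha]
    simp only [List.foldl_cons, hda]
    by_cases hg : g0 a = -1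
    · simp only [hg, beq_self_eq_true, if_pos]
      have := ih (fun k hk => hr k (by simp [hk]))
        (d.insert a s) (fun k => if k = a then s else g0 k) ?_ k
      · rw [this]
        by_cases hk : 1 ≤ k ∧ k ≤ max_num
        · simp only [hk, if_pos, and_self]
          congr 1
          by_cases hka : k = a
          · subst hka
            simp only [if_pos rfl, List.mem_cons]
            have : ¬ (s = -1) := by omega
            simp [this, hg]
          · simp [hka]
        · simp [hk]
      · intro k
        rw [PySem.Dict.get?_insert]
        by_cases hka : k = a
        · subst hka; simp [ha]
        · simp [hka, hd k]
    · have hgb : (g0 a == -1) = false := by simp [hg]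
      simp only [hgb, Bool.false_eq_true, if_neg, not_false_iff]
      have := ih (fun k hk => hr k (by simp [hk])) d g0 hd k
      rw [this]
      by_cases hk : 1 ≤ k ∧ k ≤ max_num
      · simp only [hk, if_pos, and_self]
        congr 1
        by_cases hka : k = a
        · subst hka; simp [hg]
        · simp [List.mem_cons, hka]
      · simp [hk]

theorem pv_foldA (max_num : Int) (ds : List (List (String × List Int))) (s : Int) (hs : 0 ≤ s)
    (hr : ∀ x ∈ ds, ∀ k ∈ pvNums x, 1 ≤ k ∧ k ≤ max_num)
    (d : PySem.Dict Int Int) (g0 : Int → Int)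
    (hd : ∀ k, d.get? k = if 1 ≤ k ∧ k ≤ max_num then some (g0 k) else none) :
    ∀ k, ((PySem.List.enumerate ds s).foldl
        (fun d p => (pvNums p.2).foldl
          (fun d n => if d.getD n (-2) == -1 then d.insert n p.1 else d) d) d).get? k =
      if 1 ≤ k ∧ k ≤ max_num then
        some (if g0 k = -1 then (pvFirstP ds s k).getD (-1) else g0 k) else none := by
  induction ds generalizing s d g0 with
  | nil =>
    intro k
    simp only [PySem.List.enumerate_nil, List.foldl_nil, hd k, pvFirstP]
    by_cases hg : g0 k = -1 <;> simp [hg]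
  | cons x xs ih =>
    intro k
    rw [PySem.List.enumerate_cons, List.foldl_cons]
    have hinner := pv_innerA max_num (pvNums x) s hs (hr x (by simp)) d g0 hd
    have := ih (s + 1) (by omega) (fun y hy => hr y (by simp [hy]))
      _ (fun k => if g0 k = -1 ∧ k ∈ pvNums x then s else g0 k) hinner k
    rw [this]
    by_cases hk : 1 ≤ k ∧ k ≤ max_num
    · simp only [hk, if_pos, and_self, pvFirstP]
      congr 1
      by_cases hg : g0 k = -1
      · by_cases hm : k ∈ pvNums x
        · have : ¬ (s = -1) := by omega
          simp [hg, hm, this]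
        · simp [hg, hm]
      · simp [hg]
    · simp [hk]

theorem pv_firstP_append (as bs : List (List (String × List Int))) (s n : Int) :
    pvFirstP (as ++ bs) s n =
      match pvFirstP as s n with
      | some j => some j
      | none => pvFirstP bs (s + as.length) n := by
  induction as generalizing s with
  | nil => simp [pvFirstP]
  | cons x xs ih =>
    simp only [List.cons_append, pvFirstP]
    by_cases hm : n ∈ pvNums x
    · simp [hm]
    · simp only [hm, if_neg, not_false_iff, ih (s + 1), List.length_cons]
      have : s + 1 + (xs.length : Int) = s + (xs.length + 1 : Nat) := by push_cast; ring
      rw [this]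

theorem pv_lastP_shift (ds : List (List (String × List Int))) (s t n : Int) :
    pvLastP ds (s + t) n = (pvLastP ds s n).map (· + t) := by
  induction ds generalizing s with
  | nil => simp [pvLastP]
  | cons x xs ih =>
    simp only [pvLastP]
    have : s + t + 1 = (s + 1) + t := by ring
    rw [this, ih (s + 1)]
    cases pvLastP xs (s + 1) n with
    | some j => simp
    | none => by_cases hm : n ∈ pvNums x <;> simp [hm]

theorem pv_first_reverse (ds : List (List (String × List Int))) (n : Int) :
    pvFirstP ds.reverse 0 n = (pvLastP ds 0 n).map (fun j => (ds.length : Int) - 1 - j) := by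
  induction ds with
  | nil => simp [pvFirstP, pvLastP]
  | cons x xs ih =>
    rw [List.reverse_cons, pv_firstP_append, ih]
    have hsh : pvLastP xs 1 n = (pvLastP xs 0 n).map (· + 1) := by
      have := pv_lastP_shift xs 0 1 n; simpa using this
    simp only [pvLastP, zero_add, hsh]
    cases pvLastP xs 0 n with
    | some j =>
      simp only [Option.map_some, List.length_cons, List.length_reverse]
      congr 1; push_cast; ring
    | none =>
      simp only [Option.map_some, Option.map_none, pvFirstP, List.length_reverse,
        List.length_cons]
      by_cases hm : n ∈ pvNums x
      · simp only [hm, if_pos]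
        congr 1; push_cast; ring
      · simp [hm]

theorem pv_lastP_none_iff (ds : List (List (String × List Int))) (s n : Int) :
    pvLastP ds s n = none ↔ ∀ x ∈ ds, n ∉ pvNums x := by
  induction ds generalizing s with
  | nil => simp [pvLastP]
  | cons x xs ih =>
    simp only [pvLastP, List.mem_cons]
    cases hx : pvLastP xs (s + 1) n with
    | some j =>
      constructor
      · intro h; exact absurd h (by simp)
      · intro h
        have hnone : pvLastP xs (s + 1) n = none :=
          (ih (s + 1)).mpr (fun y hy => h y (Or.inr hy))
        rw [hx] at hnone
        exact absurd hnone (by simp)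
    | none =>
      have hxs := (ih (s + 1)).mp hx
      by_cases hm : n ∈ pvNums x
      · rw [if_pos hm]
        constructor
        · intro h; exact absurd h (by simp)
        · intro h; exact absurd hm (h x (Or.inl rfl))
      · rw [if_neg hm]
        constructor
        · intro _ y hy
          rcases hy with rfl | hy
          · exact hm
          · exact hxs y hy
        · intro _; rfl

theorem pv_lastP_bounds (ds : List (List (String × List Int))) (n : Int) :
    ∀ (s j : Int), pvLastP ds s n = some j → s ≤ j ∧ j < s + ds.length := by
  induction ds with
  | nil => intro s j h; simp [pvLastP] at h
  | cons x xs ih =>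
    intro s j h
    simp only [pvLastP] at h
    cases hx : pvLastP xs (s + 1) n with
    | some j' =>
      rw [hx] at h
      simp only [Option.some.injEq] at h
      subst h
      have := ih (s + 1) j' hx
      constructor
      · omega
      · simp only [List.length_cons]; push_cast; omega
    | none =>
      rw [hx] at h
      by_cases hm : n ∈ pvNums x
      · rw [if_pos hm] at h
        simp only [Option.some.injEq] at h
        subst h
        constructor
        · omega
        · simp only [List.length_cons]; push_cast; omega
      · rw [if_neg hm] at h; exact absurd h (by simp)

theorem pv_lastP_append (as bs : List (List (String × List Int))) (s n : Int) :
    pvLastP (as ++ bs) s n =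
      match pvLastP bs (s + as.length) n with
      | some j => some j
      | none => pvLastP as s n := by
  induction as generalizing s with
  | nil => simp only [List.nil_append, List.length_nil, Nat.cast_zero, add_zero]
           cases pvLastP bs s n <;> simp [pvLastP]
  | cons x xs ih =>
    simp only [List.cons_append, pvLastP, ih (s + 1), List.length_cons]
    have : s + 1 + (xs.length : Int) = s + ((xs.length : Int) + 1) := by ring
    rw [this]
    push_cast
    cases pvLastP bs (s + ((xs.length : Int) + 1)) n <;> rfl

-- membership in the set built by folding Set.update over a list of draws
theorem pv_mem_collect (ds : List (List (String × List Int))) (s : PySem.Set Int) (n : Int) :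
    n ∈ ds.foldl (fun s d => PySem.Set.update s (pvNums d)) s ↔
      n ∈ s ∨ ∃ x ∈ ds, n ∈ pvNums x := by
  induction ds generalizing s with
  | nil => simp
  | cons x xs ih =>
    simp only [List.foldl_cons, ih, PySem.Set.mem_update, List.mem_cons]
    constructor
    · rintro ((h | h) | ⟨y, hy, hn⟩)
      · exact Or.inl h
      · exact Or.inr ⟨x, Or.inl rfl, h⟩
      · exact Or.inr ⟨y, Or.inr hy, hn⟩
    · rintro (h | ⟨y, (rfl | hy), hn⟩)
      · exact Or.inl (Or.inl h)
      · exact Or.inl (Or.inr hn)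
      · exact Or.inr ⟨y, hy, hn⟩

-- n occurs in the dropped suffix iff its last occurrence index is ≥ k
theorem pv_mem_drop_iff (ds : List (List (String × List Int))) (k : Nat) (n : Int) :
    (∃ x ∈ ds.drop k, n ∈ pvNums x) ↔
      ∃ j, pvLastP ds 0 n = some j ∧ (k : Int) ≤ j := by
  have hsplit : ds = ds.take k ++ ds.drop k := (List.take_append_drop k ds).symm
  by_cases hk : k ≤ ds.length
  · have htl : (ds.take k).length = k := by simp [List.length_take, Nat.min_eq_left hk]
    constructor
    · intro ⟨x, hx, hn⟩
      have hne : ¬ (pvLastP (ds.drop k) (0 + (ds.take k).length) n = none) := by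
        rw [pv_lastP_none_iff]
        push_neg
        exact ⟨x, hx, hn⟩
      cases hL : pvLastP (ds.drop k) (0 + (ds.take k).length) n with
      | none => exact absurd hL hne
      | some j =>
        have hb := pv_lastP_bounds _ _ _ _ hL
        refine ⟨j, ?_, by rw [htl] at hb; omega⟩
        conv_lhs => rw [hsplit]
        rw [pv_lastP_append, hL]
    · intro ⟨j, hj, hkj⟩
      conv at hj => rw [hsplit]
      rw [pv_lastP_append] at hj
      cases hL : pvLastP (ds.drop k) (0 + (ds.take k).length) n with
      | none =>
        rw [hL] at hj
        have hb := pv_lastP_bounds _ _ _ _ hj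
        rw [htl] at hb
        simp only [zero_add] at hb hkj
        omega
      | some j' =>
        have hne : ¬ (pvLastP (ds.drop k) (0 + ((ds.take k).length : Int)) n = none) := by
          rw [hL]; simp
        rw [pv_lastP_none_iff] at hne
        push_neg at hne
        exact hne
  · push_neg at hk
    have hdrop : ds.drop k = [] := List.drop_eq_nil_of_le (by omega)
    constructor
    · intro ⟨x, hx, _⟩; rw [hdrop] at hx; simp at hx
    · intro ⟨j, hj, hkj⟩
      have hb := pv_lastP_bounds _ _ _ _ hj
      omega

theorem pv_res_loop (gap_min gap_max : Int) (f : Int → Int) (cands : List Int)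
    (acc : List Int) :
    cands.foldl
      (fun res n =>
        let g := f n
        if g < gap_min then res ++ [n]
        else if g > gap_max then res
        else res ++ [n]) acc =
      acc ++ cands.filter (fun n => f n < gap_min || f n ≤ gap_max) := by
  induction cands generalizing acc with
  | nil => simp
  | cons a t ih =>
    simp only [List.foldl_cons, List.filter_cons]
    by_cases h1 : f a < gap_min
    · simp only [h1, if_pos, decide_true, Bool.true_or, ih]
      simp
    · by_cases h2 : f a > gap_max
      · have : ¬ (f a ≤ gap_max) := by omega
        simp only [h1, h2, if_neg, not_false_iff, if_pos, ih, decide_eq_true_eq]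
        simp [h1, this]
      · have h3 : f a ≤ gap_max := by omega
        simp only [h1, h2, if_neg, not_false_iff, ih]
        simp [h3]

-- A's output as a filter over the gap characterisation pvGapA
theorem pv_A_eq (history : List (List (String × List Int))) (candidates : List Int)
    (max_num gap_min gap_max : Int) (hh : history ≠ [])
    (hr : ∀ x ∈ history, ∀ k ∈ pvNums x, 1 ≤ k ∧ k ≤ max_num) :
    cycle_aware_filter_v11 history candidates max_num gap_min gap_max =
      candidates.filter (fun n =>
        pvGapA history max_num n < gap_min || pvGapA history max_num n ≤ gap_max) := by
  unfold cycle_aware_filter_v11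
  rw [if_neg hh]
  have hinit : ∀ k, (PySem.Dict.mk
      ((PySem.List.pyRange 1 (max_num + 1) 1).map (fun i => (i, -1)))).get? k =
      if 1 ≤ k ∧ k ≤ max_num then some ((fun _ => (-1 : Int)) k) else none := by
    intro k
    rw [pv_get_mk_map_const]
    have : k ∈ PySem.List.pyRange 1 (max_num + 1) 1 ↔ 1 ≤ k ∧ k ≤ max_num := by
      rw [PySem.List.mem_pyRange_one]; omega
    by_cases hk : 1 ≤ k ∧ k ≤ max_num <;> simp [hk, this]
  have hA := pv_foldA max_num history.reverse 0 (by omega) (by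
    intro x hx; exact hr x (List.mem_reverse.mp hx)) _ (fun _ => (-1 : Int)) hinit
  rw [pv_res_loop]
  simp only [List.nil_append]
  apply List.filter_congr
  intro n _
  have hgap : (PySem.Dict.getD ((PySem.List.enumerate history.reverse 0).foldl
      (fun d p => (pvNums p.2).foldl
        (fun d n => if d.getD n (-2) == -1 then d.insert n p.1 else d) d)
      (PySem.Dict.mk ((PySem.List.pyRange 1 (max_num + 1) 1).map (fun i => (i, -1))))) n 100) =
      pvGapA history max_num n := by
    rw [PySem.Dict.getD_eq_get?_getD, hA n, pv_first_reverse]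
    unfold pvGapA
    cases hL : pvLastP history 0 n with
    | some j =>
      have hne : pvLastP history 0 n ≠ none := by simp [hL]
      rw [Ne, pv_lastP_none_iff] at hne
      push_neg at hne
      obtain ⟨x, hx, hn⟩ := hne
      have hk : 1 ≤ n ∧ n ≤ max_num := hr x hx n hn
      simp [hk]
    | none =>
      by_cases hk : 1 ≤ n ∧ n ≤ max_num <;> simp [hk]
  rw [hgap]

-- ===== VERDICT (by name: the statements are the Claim_ definitions above) =====
theorem cycle_aware_filter_v11_spec : Claim_unchanged_cycle_aware_filter_v11 := by
  intro history candidates max_num gap_min gap_max _hdom hpre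
  unfold Spec_cycle_aware_filter_v11
  intro hnd
  by_cases hh : history = []
  · unfold cycle_aware_filter_v11 cycle_aware_filter_v11_alt
    simp [hh]
  · have hr : ∀ x ∈ history, ∀ k ∈ pvNums x, 1 ≤ k ∧ k ≤ max_num := by
      rcases hpre with h | h
      · exact absurd h hh
      · intro x hx k hk; exact (h x hx).2 k hk
    rw [pv_A_eq history candidates max_num gap_min gap_max hh hr]
    unfold cycle_aware_filter_v11_alt
    rw [if_neg hh]
    dsimp only
    apply List.filter_congr
    intro n hn
    have hstart : (0 : Int) ≤ max 0 ((history.length : Int) - max gap_min (gap_max + 1)) :=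
      le_max_left _ _
    rw [PySem.List.slice_from _ hstart]
    rw [Bool.eq_iff_iff]
    simp only [Bool.or_eq_true, Bool.and_eq_true, Bool.not_eq_true', decide_eq_true_eq]
    rw [PySem.Set.contains_iff, pv_mem_collect]
    simp only [PySem.Set.empty, List.not_mem_nil, false_or]
    rw [pv_mem_drop_iff, Int.toNat_of_nonneg hstart]
    have hever : ((List.foldl (fun s d => PySem.Set.update s (pvNums d))
        ([] : PySem.Set Int) history).contains n = false) ↔ pvLastP history 0 n = none := by
      rw [Bool.eq_false_iff, Ne, PySem.Set.contains_iff, pv_mem_collect, pv_lastP_none_iff]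
      simp only [List.not_mem_nil, false_or]
      exact ⟨fun h x hx hnx => h ⟨x, hx, hnx⟩, fun h hex => hex.elim
        (fun x hx => h x hx.1 hx.2)⟩
    rw [hever]
    cases hL : pvLastP history 0 n with
    | some j =>
      have hb := pv_lastP_bounds _ _ _ _ hL
      simp only [pvGapA, hL, Option.some.injEq, reduceCtorEq, false_and, and_false, or_false]
      constructor
      · intro h; exact ⟨j, rfl, by omega⟩
      · rintro ⟨j', rfl, hj'⟩; omega
    | none =>
      have huns : ∀ x ∈ history, n ∉ pvNums x := (pv_lastP_none_iff history 0 n).mp hL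
      simp only [pvGapA, hL, reduceCtorEq, false_and, exists_false, false_or, true_and]
      by_cases hin : 1 ≤ n ∧ n ≤ max_num
      · have hg : ¬ (gap_min < 0 ∧ gap_max < -1) :=
          fun hg => hnd ⟨hh, n, hn, huns, by rw [if_pos hin]; exact hg⟩
        rw [if_pos hin]
        constructor
        · intro _; exact hin
        · intro _; omega
      · have hg : ¬ (100 < gap_min ∨ 100 ≤ gap_max) :=
          fun hg => hnd ⟨hh, n, hn, huns, by rw [if_neg hin]; exact hg⟩
        rw [if_neg hin]
        constructor
        · intro h; omega
        · intro hin'; exact absurd hin' hin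

theorem cycle_aware_filter_v11_changed : Claim_changed_cycle_aware_filter_v11 := by
  unfold Claim_changed_cycle_aware_filter_v11; decide

theorem cycle_aware_filter_v11_tight : Claim_exact_cycle_aware_filter_v11 := by
  intro history candidates max_num gap_min gap_max _hdom hpre hd
  obtain ⟨hh, n, hn, huns, hcond⟩ := hd
  have hr : ∀ x ∈ history, ∀ k ∈ pvNums x, 1 ≤ k ∧ k ≤ max_num := by
    rcases hpre with h | h
    · exact absurd h hh
    · intro x hx k hk; exact (h x hx).2 k hk
  rw [pv_A_eq history candidates max_num gap_min gap_max hh hr]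
  unfold cycle_aware_filter_v11_alt
  rw [if_neg hh]
  dsimp only
  intro heq
  have hstart : (0 : Int) ≤ max 0 ((history.length : Int) - max gap_min (gap_max + 1)) :=
    le_max_left _ _
  by_cases hin : 1 ≤ n ∧ n ≤ max_num
  · rw [if_pos hin] at hcond
    obtain ⟨hgm, hgx⟩ := hcond -- A drops the never-drawn valid n (gap -1 fails both negative thresholds); B keeps it
    have hL : pvLastP history 0 n = none := (pv_lastP_none_iff history 0 n).mpr huns
    have hBn : n ∈ candidates.filter (fun n =>
        PySem.Set.contains ((PySem.List.slice history
            (some (max 0 ((history.length : Int) - max gap_min (gap_max + 1)))) none).foldl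
          (fun s d => PySem.Set.update s (pvNums d)) PySem.Set.empty) n ||
        (!PySem.Set.contains (history.foldl
            (fun s d => PySem.Set.update s (pvNums d)) PySem.Set.empty) n &&
          (decide (1 ≤ n) && decide (n ≤ max_num)))) := by
      apply List.mem_filter.mpr
      refine ⟨hn, ?_⟩
      have hever : PySem.Set.contains (history.foldl
          (fun s d => PySem.Set.update s (pvNums d)) PySem.Set.empty) n = false := by
        rw [Bool.eq_false_iff, Ne, PySem.Set.contains_iff, pv_mem_collect]
        simp only [PySem.Set.empty, List.not_mem_nil, false_or]
        intro ⟨x, hx, hnx⟩; exact huns x hx hnx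
      rw [hever]
      simp [hin.1, hin.2]
    rw [← heq] at hBn
    have := (List.mem_filter.mp hBn).2
    simp only [pvGapA, hL, if_pos hin, Bool.or_eq_true, decide_eq_true_eq] at this
    omega
  · rw [if_neg hin] at hcond
    have hg := hcond
    -- A keeps the out-of-range n (pseudo-gap 100 passes a threshold ≥ 100); B drops it
    have hL : pvLastP history 0 n = none := (pv_lastP_none_iff history 0 n).mpr huns
    have hAn : n ∈ candidates.filter (fun n =>
        pvGapA history max_num n < gap_min || pvGapA history max_num n ≤ gap_max) := by
      apply List.mem_filter.mpr
      refine ⟨hn, ?_⟩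
      simp only [pvGapA, hL, if_neg hin, Bool.or_eq_true, decide_eq_true_eq]
      omega
    rw [heq] at hAn
    have hpred := (List.mem_filter.mp hAn).2
    have hrec : PySem.Set.contains ((PySem.List.slice history
        (some (max 0 ((history.length : Int) - max gap_min (gap_max + 1)))) none).foldl
        (fun s d => PySem.Set.update s (pvNums d)) PySem.Set.empty) n = false := by
      rw [PySem.List.slice_from _ hstart, Bool.eq_false_iff, Ne, PySem.Set.contains_iff,
        pv_mem_collect]
      simp only [PySem.Set.empty, List.not_mem_nil, false_or]
      intro ⟨x, hx, hnx⟩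
      exact huns x (List.mem_of_mem_drop hx) hnx
    rw [hrec] at hpred
    simp only [Bool.false_or, Bool.and_eq_true, decide_eq_true_eq] at hpred
    exact hin ⟨hpred.2.1, hpred.2.2⟩
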